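-- pv_equiv track=rewrite | github.com/pypi-data/pypi-mirror-379 | packages/gedcom-x/gedcom_x-0.5.15.tar.gz/gedcom_x-0.5.15/gedcomx/schemas.py | _split_top_level
-- ===== SOURCE A (Python) =====
-- def _split_top_level(s: str, sep: str) -> list[str]:
--     """
--     Split `s` by single-char separator (',' or '|') at top level (not inside brackets).
--     """
--     out: list[str] = []
--     buf: list[str] = []
--     depth = 0
--     for ch in s:
--         if ch == "[":
--             depth += 1
--         elif ch == "]":
--             depth -= 1
--         if ch == sep and depth == 0:
--             out.append("".join(buf).strip())
--             buf = []
--         else: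
--             buf.append(ch)
--     out.append("".join(buf).strip())
--     return [p for p in out if p != ""]
-- ===== SOURCE B (Python) =====
-- def _split_top_level(s: str, sep: str) -> list[str]:
--     """Split by first top-level sep, slice, repeat: find-next-cut + slicing instead of a char buffer."""
--     def _find_cut(t: str) -> int | None:
--         depth = 0
--         for i, ch in enumerate(t):
--             if ch == "[":
--                 depth += 1
--             elif ch == "]":
--                 depth -= 1
--             if ch == sep and depth == 0:
--                 return i
--         return None
--
--     parts: list[str] = []
--     rest = s
--     while True:
--         i = _find_cut(rest)
--         if i is None:
--             parts.append(rest)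
--             break
--         parts.append(rest[:i])
--         rest = rest[i + 1:]
--     return [q for q in (p.strip() for p in parts) if q != ""]
-- ===== Notes on version B (the rewrite author's own statement) =====
-- stated objective: alternative
-- what changed: A builds segments in one pass with a character buffer accumulated char-by-char; B repeatedly finds the index of the next top-level separator and slices the string there, keeping no buffer.
import Mathlib
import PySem

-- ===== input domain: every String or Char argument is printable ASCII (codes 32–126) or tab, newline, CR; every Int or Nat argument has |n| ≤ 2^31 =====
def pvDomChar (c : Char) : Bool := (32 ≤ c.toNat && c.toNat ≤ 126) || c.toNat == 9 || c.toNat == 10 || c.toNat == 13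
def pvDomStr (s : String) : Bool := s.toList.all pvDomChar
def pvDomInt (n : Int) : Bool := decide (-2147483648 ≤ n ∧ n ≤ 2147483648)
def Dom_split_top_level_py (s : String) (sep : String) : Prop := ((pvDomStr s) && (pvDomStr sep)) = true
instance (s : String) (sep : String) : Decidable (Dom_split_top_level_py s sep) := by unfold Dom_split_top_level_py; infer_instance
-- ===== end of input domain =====

-- B replaces A's char-buffer accumulator loop by find-next-top-level-separator + slicing (objective: alternative decomposition, same cost).

-- the depth update both Pythons perform on each character ('[' opens, ']' closes)
def pvDepth (ch : Char) (d : Int) : Int :=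
  if ch = '[' then d + 1 else if ch = ']' then d - 1 else d

-- ===== PORT A =====
-- the body of A's for-loop: state is (out, buf, depth); ch == sep is [ch] = sep.toList
def pvStepA (sepL : List Char) (st : List String × List Char × Int) (ch : Char) :
    List String × List Char × Int :=
  if sepL = [ch] ∧ pvDepth ch st.2.2 = 0 then
    (st.1 ++ [String.ofList (PySem.Chars.strip st.2.1)], [], pvDepth ch st.2.2)
  else
    (st.1, st.2.1 ++ [ch], pvDepth ch st.2.2)

def split_top_level_py (s : String) (sep : String) : List String :=
  let st := s.toList.foldl (pvStepA sep.toList) ([], [], 0)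
  (st.1 ++ [String.ofList (PySem.Chars.strip st.2.1)]).filter (fun p => p != "")

-- ===== PORT B =====
-- Source B's _find_cut: first index i with t[i] == sep at top level (enumerate loop as structural recursion)
def pvFindCut (sepL : List Char) : List Char → Int → Option Nat
  | [], _ => none
  | c :: cs, depth =>
    if sepL = [c] ∧ pvDepth c depth = 0 then some 0
    else (pvFindCut sepL cs (pvDepth c depth)).map (· + 1)

theorem pvFindCut_lt (sepL : List Char) (cs : List Char) (d : Int) (i : Nat)
    (h : pvFindCut sepL cs d = some i) : i < cs.length := by
  induction cs generalizing d i with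
  | nil => simp [pvFindCut] at h
  | cons c cs ih =>
    simp only [pvFindCut] at h
    split_ifs at h
    · cases h; simp
    · obtain ⟨j, hj, hji⟩ := Option.map_eq_some_iff.mp h
      have := ih _ _ hj
      simp only [List.length_cons]
      omega

-- Source B's while loop: cut off rest[:i], continue with rest[i+1:]
-- (slices with in-range non-negative indices are exactly take/drop)
def pvLoopB (sepL : List Char) (rest : List Char) : List (List Char) :=
  match h : pvFindCut sepL rest 0 with
  | none => [rest]
  | some i => rest.take i :: pvLoopB sepL (rest.drop (i + 1))
termination_by rest.length
decreasing_by
  have := pvFindCut_lt sepL rest 0 i h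
  simp only [List.length_drop]; omega

def split_top_level_py_alt (s : String) (sep : String) : List String :=
  ((pvLoopB sep.toList s.toList).map (fun p => String.ofList (PySem.Chars.strip p))).filter
    (fun q => q != "")

-- ===== PRECONDITION & SPEC =====
def Spec_split_top_level_py (s : String) (sep : String) (out : List String) : Prop := out = split_top_level_py_alt s sep
instance (s : String) (sep : String) (out : List String) : Decidable (Spec_split_top_level_py s sep out) := by unfold Spec_split_top_level_py; infer_instance

-- ===== CLAIM (what is proved, stated in full; the proofs are below) =====
def Claim_equal_split_top_level_py : Prop := ∀ (s : String) (sep : String), Dom_split_top_level_py s sep → Spec_split_top_level_py s sep (split_top_level_py s sep)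

-- ===== LEMMAS AND PROOFS =====

-- common specification: the raw (unstripped) top-level segments of cs, starting at depth d
def pvSegs (sepL : List Char) : List Char → Int → List (List Char)
  | [], _ => [[]]
  | c :: cs, d =>
    if sepL = [c] ∧ pvDepth c d = 0 then [] :: pvSegs sepL cs (pvDepth c d)
    else (pvSegs sepL cs (pvDepth c d)).modifyHead (c :: ·)

theorem pvSegs_ne_nil (sepL : List Char) : ∀ (cs : List Char) (d : Int), pvSegs sepL cs d ≠ []
  | [], _ => by simp [pvSegs]
  | c :: cs, d => by
    simp only [pvSegs]
    split_ifs
    · simp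
    · simp only [ne_eq, List.modifyHead_eq_nil_iff]
      exact pvSegs_ne_nil sepL cs _

theorem pvStepA_pos (sepL : List Char) (out : List String) (buf : List Char) (d : Int)
    (ch : Char) (hc : sepL = [ch] ∧ pvDepth ch d = 0) :
    pvStepA sepL (out, buf, d) ch =
      (out ++ [String.ofList (PySem.Chars.strip buf)], [], pvDepth ch d) := by
  simp [pvStepA, hc]

theorem pvStepA_neg (sepL : List Char) (out : List String) (buf : List Char) (d : Int)
    (ch : Char) (hc : ¬ (sepL = [ch] ∧ pvDepth ch d = 0)) :
    pvStepA sepL (out, buf, d) ch = (out, buf ++ [ch], pvDepth ch d) := by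
  simp only [pvStepA]
  rw [if_neg hc]

-- A's fold from an arbitrary state: out ++ the stripped segments, buf prepended to the first
theorem pvFoldA (sepL : List Char) (cs : List Char) (out : List String) (buf : List Char)
    (d : Int) :
    (cs.foldl (pvStepA sepL) (out, buf, d)).1 ++
      [String.ofList (PySem.Chars.strip (cs.foldl (pvStepA sepL) (out, buf, d)).2.1)] =
    out ++ ((pvSegs sepL cs d).modifyHead (buf ++ ·)).map
      (fun p => String.ofList (PySem.Chars.strip p)) := by
  induction cs generalizing out buf d with
  | nil => simp [pvSegs]
  | cons c cs ih =>
    obtain ⟨h0, t0, hS⟩ := List.exists_cons_of_ne_nil (pvSegs_ne_nil sepL cs (pvDepth c d))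
    rw [List.foldl_cons]
    by_cases hc : sepL = [c] ∧ pvDepth c d = 0
    · rw [pvStepA_pos sepL out buf d c hc, ih]
      simp only [pvSegs]
      rw [if_pos hc, hS]
      simp
    · rw [pvStepA_neg sepL out buf d c hc, ih]
      simp only [pvSegs]
      rw [if_neg hc, hS]
      simp

-- pvSegs satisfies Source B's find-cut recursion
theorem pvSegs_findCut (sepL : List Char) (cs : List Char) (d : Int) :
    pvSegs sepL cs d =
      match pvFindCut sepL cs d with
      | none => [cs]
      | some i => cs.take i :: pvSegs sepL (cs.drop (i + 1)) 0 := by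
  induction cs generalizing d with
  | nil => simp [pvSegs, pvFindCut]
  | cons c cs ih =>
    simp only [pvSegs, pvFindCut]
    by_cases hc : sepL = [c] ∧ pvDepth c d = 0
    · rw [if_pos hc, if_pos hc]
      simp [hc.2]
    · rw [if_neg hc, if_neg hc, ih]
      rcases hfc : pvFindCut sepL cs (pvDepth c d) with _ | i
      · simp
      · simp [List.drop_succ_cons]

-- hence B's loop computes pvSegs at depth 0
theorem pvLoopB_eq (sepL : List Char) (cs : List Char) : pvLoopB sepL cs = pvSegs sepL cs 0 := by
  generalize hn : cs.length = n
  induction n using Nat.strong_induction_on generalizing cs with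
  | _ n ih =>
    subst hn
    rw [pvLoopB]
    split
    · rename_i h
      rw [pvSegs_findCut, h]
    · rename_i i h
      have hi := pvFindCut_lt sepL cs 0 i h
      rw [pvSegs_findCut, h,
        ih (cs.drop (i + 1)).length (by simp only [List.length_drop]; omega) _ rfl]

theorem pvA_eq (s sep : String) :
    split_top_level_py s sep =
      ((pvSegs sep.toList s.toList 0).map (fun p => String.ofList (PySem.Chars.strip p))).filter
        (fun p => p != "") := by
  unfold split_top_level_py
  show ((s.toList.foldl (pvStepA sep.toList) ([], [], 0)).1 ++
      [String.ofList (PySem.Chars.strip (s.toList.foldl (pvStepA sep.toList) ([], [], 0)).2.1)]).filter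
      (fun p => p != "") = _
  rw [pvFoldA sep.toList s.toList [] [] 0]
  rw [show (fun x : List Char => [] ++ x) = id by funext x; simp, List.modifyHead_id]
  simp

-- ===== VERDICT (by name: the statement is the Claim_ definition above) =====
theorem split_top_level_py_spec : Claim_equal_split_top_level_py := by
  intro s sep _
  unfold Spec_split_top_level_py split_top_level_py_alt
  rw [pvLoopB_eq, pvA_eq]
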